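-- pv_equiv track=rewrite | github.com/YMUNick/marksix | generate_data.py | compute_odd_even
-- ===== SOURCE A (Python) =====
-- def compute_odd_even(draws):
--     """Odd/even distribution across all draws."""
--     odd_total = 0
--     even_total = 0
--     for d in draws:
--         for n in d['numbers']:
--             if n % 2 == 1:
--                 odd_total += 1
--             else:
--                 even_total += 1
--     return {"odd": odd_total, "even": even_total}
-- ===== SOURCE B (Python) =====
-- def compute_odd_even(draws):
--     """Odd/even distribution across all draws."""
--     if not draws:
--         return {"odd": 0, "even": 0}
--     rest = compute_odd_even(draws[1:])
--     t = [0, 0]  # t[parity]: index by n % 2 instead of branching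
--     for n in draws[0]['numbers']:
--         t[n % 2] += 1
--     return {"odd": t[1] + rest["odd"], "even": t[0] + rest["even"]}
-- ===== Notes on version B (the rewrite author's own statement) =====
-- stated objective: alternative
-- what changed: Recursion on the list of draws (head draw counted into a parity-indexed two-slot table t[n % 2], then merged with the recursive result for the tail) replaces A's iterative double loop with two named counters and a per-element if/else.
import Mathlib
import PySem

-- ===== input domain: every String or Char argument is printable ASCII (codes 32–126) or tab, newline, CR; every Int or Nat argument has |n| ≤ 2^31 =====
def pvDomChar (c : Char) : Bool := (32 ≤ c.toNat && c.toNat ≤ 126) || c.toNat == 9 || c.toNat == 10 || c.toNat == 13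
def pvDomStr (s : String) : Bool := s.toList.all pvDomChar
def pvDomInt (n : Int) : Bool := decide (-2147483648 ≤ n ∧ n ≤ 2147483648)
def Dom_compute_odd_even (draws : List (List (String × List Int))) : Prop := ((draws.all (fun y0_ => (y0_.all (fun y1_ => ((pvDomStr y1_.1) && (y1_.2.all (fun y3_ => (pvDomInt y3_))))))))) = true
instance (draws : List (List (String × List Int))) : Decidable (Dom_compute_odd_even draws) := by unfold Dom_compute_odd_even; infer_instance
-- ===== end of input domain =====

-- B recurses on the list of draws, counting the head draw into a parity-indexed two-slot table
-- and merging with the recursive result for the tail, instead of A's iterative double loop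
-- with two named counters and a per-element if/else.

-- ===== PORT A =====
-- d['numbers']: first-match lookup; '.getD []' never fires under Pre_ (every draw has the key)
def compute_odd_even (draws : List (List (String × List Int))) : List (String × Int) :=
  let st := draws.foldl (fun (acc : Int × Int) d =>
    (((PySem.Dict.mk d).get? "numbers").getD []).foldl
      (fun (acc : Int × Int) n =>
        if PySem.Int.mod n 2 == 1 then (acc.1 + 1, acc.2) else (acc.1, acc.2 + 1)) acc)
    (0, 0)
  [("odd", st.1), ("even", st.2)]

-- ===== PORT B =====
-- t[n % 2] += 1: n % 2 is 0 or 1, so the indexed update is the matching slot of the pair (t0, t1)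
def compute_odd_even_alt : List (List (String × List Int)) → List (String × Int)
  | [] => [("odd", 0), ("even", 0)]
  | d :: rest =>
    let r := compute_odd_even_alt rest
    let t := (((PySem.Dict.mk d).get? "numbers").getD []).foldl
      (fun (t : Int × Int) n =>
        if PySem.Int.mod n 2 == 0 then (t.1 + 1, t.2) else (t.1, t.2 + 1)) (0, 0)
    [("odd", t.2 + (((PySem.Dict.mk r).get? "odd").getD 0)),
     ("even", t.1 + (((PySem.Dict.mk r).get? "even").getD 0))]

-- ===== PRECONDITION & SPEC =====
-- Pre_ excludes exactly the draws lacking a 'numbers' key, on which A (and B) raise KeyError.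
def Pre_compute_odd_even (draws : List (List (String × List Int))) : Prop :=
  (draws.all (fun d => d.any (fun p => p.1 == "numbers"))) = true
instance (draws : List (List (String × List Int))) : Decidable (Pre_compute_odd_even draws) := by unfold Pre_compute_odd_even; infer_instance
def pvWitness_compute_odd_even : (List (List (String × List Int))) :=
  [[("numbers", [1, 2, 3])], [("numbers", [4])]]
def Spec_compute_odd_even (draws : List (List (String × List Int))) (out : List (String × Int)) : Prop := out = compute_odd_even_alt draws
instance (draws : List (List (String × List Int))) (out : List (String × Int)) : Decidable (Spec_compute_odd_even draws out) := by unfold Spec_compute_odd_even; infer_instance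

-- ===== CLAIM (what is proved, stated in full; the proofs are below) =====
def Claim_equal_compute_odd_even : Prop := ∀ (draws : List (List (String × List Int))), Dom_compute_odd_even draws → Pre_compute_odd_even draws → Spec_compute_odd_even draws (compute_odd_even draws)

-- ===== LEMMAS AND PROOFS =====

def pvNums (d : List (String × List Int)) : List Int :=
  ((PySem.Dict.mk d).get? "numbers").getD []

def pvO (l : List Int) : Int := (l.map (fun n => n % 2)).sum

theorem stepA_eq :
    (fun (acc : Int × Int) n =>
        if PySem.Int.mod n 2 == 1 then (acc.1 + 1, acc.2) else (acc.1, acc.2 + 1))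
      = (fun (acc : Int × Int) (n : Int) =>
        if n % 2 = 1 then (acc.1 + 1, acc.2) else (acc.1, acc.2 + 1)) := by
  funext acc n
  rw [PySem.Int.mod_eq_emod_of_pos (by norm_num : (0:Int) < 2)]
  simp [beq_iff_eq]

theorem stepB_eq :
    (fun (t : Int × Int) n =>
        if PySem.Int.mod n 2 == 0 then (t.1 + 1, t.2) else (t.1, t.2 + 1))
      = (fun (t : Int × Int) (n : Int) =>
        if n % 2 = 1 then (t.1, t.2 + 1) else (t.1 + 1, t.2)) := by
  funext t n
  rw [PySem.Int.mod_eq_emod_of_pos (by norm_num : (0:Int) < 2)]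
  rcases Int.emod_two_eq_zero_or_one n with h | h <;> simp [h]

theorem innerA_fold (l : List Int) (a b : Int) :
    l.foldl (fun (acc : Int × Int) (n : Int) =>
        if n % 2 = 1 then (acc.1 + 1, acc.2) else (acc.1, acc.2 + 1)) (a, b)
      = (a + pvO l, b + ((l.length : Int) - pvO l)) := by
  induction l generalizing a b with
  | nil => simp [pvO]
  | cons n t ih =>
    rcases Int.emod_two_eq_zero_or_one n with h | h
    · rw [List.foldl_cons, if_neg (by rw [h]; decide), ih, Prod.ext_iff]
      simp only [pvO, List.map_cons, List.sum_cons, List.length_cons, h]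
      constructor <;> push_cast <;> ring
    · rw [List.foldl_cons, if_pos h, ih, Prod.ext_iff]
      simp only [pvO, List.map_cons, List.sum_cons, List.length_cons, h]
      constructor <;> push_cast <;> ring

theorem innerB_fold (l : List Int) (a b : Int) :
    l.foldl (fun (t : Int × Int) (n : Int) =>
        if n % 2 = 1 then (t.1, t.2 + 1) else (t.1 + 1, t.2)) (a, b)
      = (a + ((l.length : Int) - pvO l), b + pvO l) := by
  induction l generalizing a b with
  | nil => simp [pvO]
  | cons n t ih =>
    rcases Int.emod_two_eq_zero_or_one n with h | h
    · rw [List.foldl_cons, if_neg (by rw [h]; decide), ih, Prod.ext_iff]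
      simp only [pvO, List.map_cons, List.sum_cons, List.length_cons, h]
      constructor <;> push_cast <;> ring
    · rw [List.foldl_cons, if_pos h, ih, Prod.ext_iff]
      simp only [pvO, List.map_cons, List.sum_cons, List.length_cons, h]
      constructor <;> push_cast <;> ring

theorem alt_spec (ds : List (List (String × List Int))) :
    compute_odd_even_alt ds
      = [("odd", pvO (ds.flatMap pvNums)),
         ("even", ((ds.flatMap pvNums).length : Int) - pvO (ds.flatMap pvNums))] := by
  induction ds with
  | nil => simp [compute_odd_even_alt, pvO]
  | cons d t ih =>
    simp only [compute_odd_even_alt, ih, stepB_eq, innerB_fold, List.flatMap_cons, pvNums, pvO,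
      List.map_append, List.sum_append, List.length_append]
    simp [PySem.Dict.get?]
    ring

theorem outerA_fold (ds : List (List (String × List Int))) (a b : Int) :
    ds.foldl (fun (acc : Int × Int) d =>
      (((PySem.Dict.mk d).get? "numbers").getD []).foldl
        (fun (acc : Int × Int) (n : Int) =>
          if n % 2 = 1 then (acc.1 + 1, acc.2) else (acc.1, acc.2 + 1)) acc) (a, b)
    = (a + pvO (ds.flatMap pvNums),
       b + (((ds.flatMap pvNums).length : Int) - pvO (ds.flatMap pvNums))) := by
  induction ds generalizing a b with
  | nil => simp [pvO]
  | cons d t ih =>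
    simp only [List.foldl_cons, innerA_fold]
    rw [ih]
    simp only [List.flatMap_cons, pvNums, pvO, List.map_append, List.sum_append,
      List.length_append, Prod.ext_iff]
    constructor <;> push_cast <;> ring

-- ===== VERDICT (by name: the statement is the Claim_ definition above) =====
theorem compute_odd_even_spec : Claim_equal_compute_odd_even := by
  intro draws _ _
  show compute_odd_even draws = compute_odd_even_alt draws
  unfold compute_odd_even
  simp only [stepA_eq]
  rw [alt_spec]
  simp only [outerA_fold]
  norm_num
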